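-- pv_equiv track=rewrite | github.com/karthikeyansri/RutgersHW | python-challenge/PyBank/main.py | calculate_total_months
-- ===== SOURCE A (Python) =====
-- def calculate_total_months(data):
--
--     '''
--         Set is used to calculate the number of months.
--         Set will discard duplicates and hence,
--         even if the data had duplicates,
--         it will not be added to the set and
--         we will get the exact number of months in the data
--     '''
--     month_year_set = set([])
--     for item in data:
--         month = item[0].split('-')[0]
--         year = item[0].split('-')[1]
--         month_year = '{}{}'.format(month, year)
--         month_year_set.add(month_year)
--     return len(month_year_set)
-- ===== SOURCE B (Python) =====
-- def calculate_total_months(data):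
--     # Build the list of month-year keys, sort it, and count distinct
--     # values in a single pass comparing each key with the previous one.
--     keys = []
--     for item in data:
--         parts = item[0].split('-')
--         keys.append('{}{}'.format(parts[0], parts[1]))
--     keys.sort()
--     total = 0
--     prev = None
--     for key in keys:
--         if prev is None or key != prev:
--             total += 1
--             prev = key
--     return total
-- ===== Notes on version B (the rewrite author's own statement) =====
-- stated objective: alternative
-- what changed: B replaces A's set-membership accumulation with building a plain list of the month-year keys, sorting it, and counting distinct values in one pass over adjacent elements.
import Mathlib
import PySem

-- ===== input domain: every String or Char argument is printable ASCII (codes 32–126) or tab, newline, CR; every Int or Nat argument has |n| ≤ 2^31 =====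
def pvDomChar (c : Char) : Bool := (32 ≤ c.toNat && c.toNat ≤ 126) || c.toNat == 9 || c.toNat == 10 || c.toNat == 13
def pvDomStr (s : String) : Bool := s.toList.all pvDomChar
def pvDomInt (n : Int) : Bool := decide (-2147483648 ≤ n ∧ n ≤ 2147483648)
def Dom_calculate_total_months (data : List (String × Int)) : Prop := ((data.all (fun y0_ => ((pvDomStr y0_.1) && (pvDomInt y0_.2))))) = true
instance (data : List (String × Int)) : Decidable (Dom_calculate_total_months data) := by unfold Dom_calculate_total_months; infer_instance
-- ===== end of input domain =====

-- B builds the list of month-year keys, sorts it, and counts distinct values by one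
-- adjacent-comparison pass, instead of A's set accumulation (alternative decomposition).


-- ===== PORT A =====
-- '{}{}'.format(month, year) on two strings is their concatenation: ported as ''.join([month, year]).
-- parts[0]/parts[1] via pyGet?; Pre_ guarantees index 1 exists (a split never yields an empty list, so index 0 always exists).
def calculate_total_months (data : List (String × Int)) : Int :=
  let month_year_set : PySem.Set String :=
    data.foldl (fun s item =>
      let month := (PySem.List.pyGet? ((PySem.Str.split? item.1 "-").getD []) 0).getD ""
      let year  := (PySem.List.pyGet? ((PySem.Str.split? item.1 "-").getD []) 1).getD ""
      let month_year := PySem.Str.join "" [month, year]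
      PySem.Set.add s month_year) PySem.Set.empty
  (month_year_set.length : Int)

-- ===== PORT B =====
-- the body of Source B's first loop: parts = item[0].split('-'); '{}{}'.format(parts[0], parts[1])
def pvKeyOf (item : String × Int) : String :=
  let parts := (PySem.Str.split? item.1 "-").getD []
  PySem.Str.join "" [(PySem.List.pyGet? parts 0).getD "", (PySem.List.pyGet? parts 1).getD ""]

-- the 'for key in keys' scan of Source B: total/prev accumulator
def pvScan_calculate_total_months : List String → Int → Option String → Int
  | [], total, _ => total
  | key :: rest, total, prev =>
      if prev = none ∨ some key ≠ prev then
        pvScan_calculate_total_months rest (total + 1) (some key)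
      else
        pvScan_calculate_total_months rest total prev

def calculate_total_months_alt (data : List (String × Int)) : Int :=
  let keys : List String := data.foldl (fun ks item => ks ++ [pvKeyOf item]) []
  let sorted_keys := PySem.List.sorted keys (fun x => x) false
  pvScan_calculate_total_months sorted_keys 0 none

-- ===== PRECONDITION & SPEC =====
-- Pre_ excludes exactly the inputs where A raises IndexError: an entry whose string
-- contains no '-' makes item[0].split('-')[1] fail (B raises there as well).
def Pre_calculate_total_months (data : List (String × Int)) : Prop :=
  ∀ p ∈ data, PySem.Str.isIn "-" p.1 = true
instance (data : List (String × Int)) : Decidable (Pre_calculate_total_months data) := by unfold Pre_calculate_total_months; infer_instance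

def pvWitness_calculate_total_months : (List (String × Int)) :=
  [("Jan-2010", 100), ("Feb-2010", -5), ("Jan-2010", 7)]

def Spec_calculate_total_months (data : List (String × Int)) (out : Int) : Prop := out = calculate_total_months_alt data
instance (data : List (String × Int)) (out : Int) : Decidable (Spec_calculate_total_months data out) := by unfold Spec_calculate_total_months; infer_instance

-- ===== CLAIM (what is proved, stated in full; the proofs are below) =====
def Claim_equal_calculate_total_months : Prop := ∀ (data : List (String × Int)), Dom_calculate_total_months data → Pre_calculate_total_months data → Spec_calculate_total_months data (calculate_total_months data)

-- ===== LEMMAS AND PROOFS =====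

-- A's accumulated set is set(keys) where keys is the list of per-item keys
lemma pvA_eq (data : List (String × Int)) :
    calculate_total_months data = ((PySem.Set.ofList (data.map pvKeyOf)).length : Int) := by
  simp only [calculate_total_months, PySem.Set.ofList_eq_foldl, List.foldl_map, pvKeyOf,
    PySem.Set.empty]

lemma pvB_eq (data : List (String × Int)) :
    calculate_total_months_alt data
      = pvScan_calculate_total_months (PySem.List.sorted (data.map pvKeyOf) (fun x => x) false) 0 none := by
  simp only [calculate_total_months_alt, PySem.List.foldl_append_singleton_eq_map, List.nil_append]

lemma pvCard_insert (s : Finset String) (x : String) :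
    (insert x s).card = (s.erase x).card + 1 := by
  conv_lhs => rw [← Finset.insert_erase (Finset.mem_insert_self x s)]
  rw [Finset.card_insert_of_notMem (Finset.notMem_erase _ _), Finset.erase_insert_eq_erase]

lemma pvScan_some (l : List String) (hl : l.Pairwise (· ≤ ·)) (c : Int) (p : String)
    (hp : ∀ x ∈ l, p ≤ x) :
    pvScan_calculate_total_months l c (some p) = c + (((l.toFinset.erase p).card : Int)) := by
  induction l generalizing c p with
  | nil => simp [pvScan_calculate_total_months]
  | cons x t ih =>
    rcases List.pairwise_cons.mp hl with ⟨hxt, ht⟩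
    have hpx : p ≤ x := hp x (by simp)
    by_cases hxp : x = p
    · subst hxp
      simp only [pvScan_calculate_total_months]
      rw [if_neg (by simp)]
      rw [ih ht c x hxt]
      rw [List.toFinset_cons, Finset.erase_insert_eq_erase]
    · simp only [pvScan_calculate_total_months]
      rw [if_pos (Or.inr (by simp [hxp]))]
      rw [ih ht (c + 1) x hxt]
      have hpnot : p ∉ (insert x t.toFinset : Finset String) := by
        intro hmem
        rcases Finset.mem_insert.mp hmem with h | h
        · exact hxp h.symm
        · exact hxp (le_antisymm (hxt p (List.mem_toFinset.mp h)) hpx)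
      rw [List.toFinset_cons, Finset.erase_eq_of_notMem hpnot, pvCard_insert]
      push_cast
      ring

lemma pvScan_none (l : List String) (hl : l.Pairwise (· ≤ ·)) (c : Int) :
    pvScan_calculate_total_months l c none = c + ((l.toFinset.card : Int)) := by
  cases l with
  | nil => simp [pvScan_calculate_total_months]
  | cons x t =>
    rcases List.pairwise_cons.mp hl with ⟨hxt, ht⟩
    simp only [pvScan_calculate_total_months]
    rw [if_pos (Or.inl trivial)]
    rw [pvScan_some t ht (c + 1) x hxt]
    rw [List.toFinset_cons, pvCard_insert]
    push_cast
    ring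

-- a nodup list's length is the card of its finset of elements
lemma pvLen_ofList (l : List String) :
    ((PySem.Set.ofList l).length : Int) = (l.toFinset.card : Int) := by
  have h1 : (PySem.Set.ofList l).toFinset = l.toFinset := by
    apply Finset.ext
    intro a
    simp [List.mem_toFinset, PySem.Set.mem_ofList]
  rw [← h1, List.toFinset_card_of_nodup (PySem.Set.nodup_ofList l)]

-- ===== VERDICT (by name: the statement is the Claim_ definition above) =====
theorem calculate_total_months_spec : Claim_equal_calculate_total_months := by
  intro data _ _
  unfold Spec_calculate_total_months
  rw [pvA_eq, pvB_eq]
  rw [pvScan_none _ (by simpa using PySem.List.sorted_pairwise (data.map pvKeyOf) (fun x => x)) 0]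
  rw [List.toFinset_eq_of_perm _ _ (PySem.List.sorted_perm (data.map pvKeyOf) (fun x => x) false)]
  rw [pvLen_ofList]
  ring
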